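-- pv_equiv track=rewrite | github.com/rashikakhandelwal225/DSA-practice | dsa/mbouquets.py | returnFlowerBloomDayAdj
-- ===== SOURCE A (Python) =====
-- def returnFlowerBloomDayAdj(mid, bloomDay,m,k):
--     bouquet_ready = 0
--     current_streak = 0  #finding flowers per bouquet
--     for i in range(0, len(bloomDay)):
--         if bloomDay[i] <= mid:
--             current_streak += 1
--             if current_streak == k:
--                  bouquet_ready += 1
--                  current_streak = 0
--         else:
--             current_streak = 0
--     return bouquet_ready
-- ===== SOURCE B (Python) =====
-- def returnFlowerBloomDayAdj(mid, bloomDay, m, k):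
--     # Two-phase: collect run lengths of consecutive bloomed flowers, then
--     # each run contributes run // k bouquets in closed form.
--     if k <= 0:
--         return 0
--     runs = []
--     length = 0
--     for x in bloomDay:
--         if x <= mid:
--             length += 1
--         else:
--             if length:
--                 runs.append(length)
--             length = 0
--     if length:
--         runs.append(length)
--     return sum(r // k for r in runs)
-- ===== Notes on version B (the rewrite author's own statement) =====
-- stated objective: alternative
-- what changed: Replaced A's count-to-k-and-reset streak counter by a two-phase decomposition: first collect the lengths of maximal consecutive bloomed runs, then each run contributes run // k bouquets via floor division (k <= 0 returns 0, as A does since its streak never reaches a non-positive k).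
import Mathlib
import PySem

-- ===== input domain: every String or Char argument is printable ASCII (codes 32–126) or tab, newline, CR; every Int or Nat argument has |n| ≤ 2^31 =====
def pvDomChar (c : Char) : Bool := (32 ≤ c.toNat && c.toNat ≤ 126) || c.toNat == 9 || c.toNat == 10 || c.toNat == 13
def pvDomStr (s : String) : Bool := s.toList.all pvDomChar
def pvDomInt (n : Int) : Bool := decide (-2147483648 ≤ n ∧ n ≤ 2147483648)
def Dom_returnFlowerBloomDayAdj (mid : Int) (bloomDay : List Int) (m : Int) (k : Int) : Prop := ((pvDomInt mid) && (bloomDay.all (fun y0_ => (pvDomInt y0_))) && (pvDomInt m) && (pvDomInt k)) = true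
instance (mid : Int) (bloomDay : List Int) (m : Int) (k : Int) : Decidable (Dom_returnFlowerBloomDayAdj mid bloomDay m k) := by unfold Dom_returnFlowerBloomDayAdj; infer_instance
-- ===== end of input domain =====

-- B replaces A's count-to-k-and-reset streak counter by a two-phase decomposition:
-- collect the lengths of maximal bloomed runs, then sum run // k per run (alternative, same cost).


-- ===== PORT A =====
-- state = (bouquet_ready, current_streak); the for-loop over bloomDay is a foldl
def returnFlowerBloomDayAdj (mid : Int) (bloomDay : List Int) (m : Int) (k : Int) : Int :=
  (bloomDay.foldl
    (fun (st : Int × Int) x =>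
      if x ≤ mid then
        let s := st.2 + 1
        if s = k then (st.1 + 1, 0) else (st.1, s)
      else (st.1, 0))
    (0, 0)).1

-- ===== PORT B =====
-- phase 1 of Source B: the loop collecting maximal bloomed-run lengths (len = running length)
def pvRunsB (mid : Int) : List Int → Int → List Int
  | [], len => if len ≠ 0 then [len] else []
  | x :: xs, len =>
      if x ≤ mid then pvRunsB mid xs (len + 1)
      else if len ≠ 0 then len :: pvRunsB mid xs 0 else pvRunsB mid xs 0

def returnFlowerBloomDayAdj_alt (mid : Int) (bloomDay : List Int) (m : Int) (k : Int) : Int :=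
  if k ≤ 0 then 0
  else ((pvRunsB mid bloomDay 0).map (fun r => PySem.Int.floordiv r k)).sum

-- ===== PRECONDITION & SPEC =====
def Spec_returnFlowerBloomDayAdj (mid : Int) (bloomDay : List Int) (m : Int) (k : Int) (out : Int) : Prop := out = returnFlowerBloomDayAdj_alt mid bloomDay m k
instance (mid : Int) (bloomDay : List Int) (m : Int) (k : Int) (out : Int) : Decidable (Spec_returnFlowerBloomDayAdj mid bloomDay m k out) := by unfold Spec_returnFlowerBloomDayAdj; infer_instance

-- ===== CLAIM (what is proved, stated in full; the proofs are below) =====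
def Claim_equal_returnFlowerBloomDayAdj : Prop := ∀ (mid : Int) (bloomDay : List Int) (m : Int) (k : Int), Dom_returnFlowerBloomDayAdj mid bloomDay m k → Spec_returnFlowerBloomDayAdj mid bloomDay m k (returnFlowerBloomDayAdj mid bloomDay m k)

-- ===== LEMMAS AND PROOFS =====

-- abbreviation of A's loop body (proof-side only)
def pvStepA (mid k : Int) (st : Int × Int) (x : Int) : Int × Int :=
  if x ≤ mid then
    let s := st.2 + 1
    if s = k then (st.1 + 1, 0) else (st.1, s)
  else (st.1, 0)

-- sum of per-run bouquets (proof-side)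
def pvSumB (k : Int) (rs : List Int) : Int := (rs.map (fun r => PySem.Int.floordiv r k)).sum

-- with k ≤ 0 the streak (kept ≥ 0) never equals k, so A never increments
theorem pvA_nonpos (mid k : Int) (hk : k ≤ 0) :
    ∀ (xs : List Int) (b s : Int), 0 ≤ s →
      (xs.foldl (pvStepA mid k) (b, s)).1 = b := by
  intro xs
  induction xs with
  | nil => intro b s _; simp
  | cons x xs ih =>
    intro b s hs
    simp only [List.foldl_cons, pvStepA]
    by_cases hx : x ≤ mid
    · have hne : ¬ (s + 1 = k) := by omega
      simp only [hx, if_true, hne, if_false]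
      exact ih b (s + 1) (by omega)
    · simp only [hx, if_false]
      exact ih b 0 le_rfl

-- floor-division facts used by both lemmas below
theorem pvFd_shift (k len : Int) (hk : 0 < k) (hlen : 0 ≤ len) :
    PySem.Int.floordiv (len + k) k = PySem.Int.floordiv len k + 1 := by
  rw [PySem.Int.floordiv_eq_ediv_of_pos hk, PySem.Int.floordiv_eq_ediv_of_pos hk]
  have := Int.add_mul_ediv_right len 1 (by omega : k ≠ 0)
  simpa using this

theorem pvFd_zero (k s : Int) (hs : 0 ≤ s) (hsk : s < k) :
    PySem.Int.floordiv s k = 0 := by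
  rw [PySem.Int.floordiv_eq_ediv_of_pos (by omega : (0:Int) < k)]
  exact Int.ediv_eq_zero_of_lt hs hsk

-- shifting the initial run length by k adds exactly one bouquet
theorem pvSum_shift (mid k : Int) (hk : 0 < k) :
    ∀ (xs : List Int) (len : Int), 0 ≤ len →
      pvSumB k (pvRunsB mid xs (len + k)) = pvSumB k (pvRunsB mid xs len) + 1 := by
  intro xs
  induction xs with
  | nil =>
    intro len hlen
    have h1 : len + k ≠ 0 := by omega
    by_cases h0 : len = 0
    · subst h0
      simp only [pvRunsB, ite_not, if_neg h1, pvSumB, List.map_cons,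
        List.map_nil, List.sum_cons, List.sum_nil]
      rw [show (0:Int) + k = 0 + k from rfl, pvFd_shift k 0 hk le_rfl,
        pvFd_zero k 0 le_rfl hk]
      simp
    · simp only [pvRunsB, ite_not, if_neg h1, if_neg h0, pvSumB, List.map_cons,
        List.map_nil, List.sum_cons, List.sum_nil]
      rw [pvFd_shift k len hk hlen]
      ring
  | cons x xs ih =>
    intro len hlen
    simp only [pvRunsB]
    by_cases hx : x ≤ mid
    · simp only [hx, if_true]
      have : len + k + 1 = (len + 1) + k := by ring
      rw [this]
      exact ih (len + 1) (by omega)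
    · have h1 : len + k ≠ 0 := by omega
      simp only [hx, if_false, ite_not, if_neg h1]
      by_cases h0 : len = 0
      · subst h0
        simp only [pvSumB, List.map_cons, List.sum_cons]
        rw [pvFd_shift k 0 hk le_rfl, pvFd_zero k 0 le_rfl hk]
        simp
        omega
      · simp only [if_neg h0, pvSumB, List.map_cons, List.sum_cons]
        rw [pvFd_shift k len hk hlen]
        ring

-- main invariant: A's fold from streak s equals b plus B's per-run sum with initial run length s
theorem pvA_eq_sum (mid k : Int) (hk : 0 < k) :
    ∀ (xs : List Int) (b s : Int), 0 ≤ s → s < k →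
      (xs.foldl (pvStepA mid k) (b, s)).1 = b + pvSumB k (pvRunsB mid xs s) := by
  intro xs
  induction xs with
  | nil =>
    intro b s hs hsk
    by_cases h0 : s = 0
    · subst h0; simp [pvRunsB, pvSumB]
    · simp only [List.foldl_nil, pvRunsB, ite_not, if_neg h0, pvSumB, List.map_cons,
        List.map_nil, List.sum_cons, List.sum_nil]
      rw [pvFd_zero k s hs hsk]
      omega
  | cons x xs ih =>
    intro b s hs hsk
    simp only [List.foldl_cons, pvStepA]
    by_cases hx : x ≤ mid
    · simp only [hx, if_true]
      by_cases he : s + 1 = k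
      · simp only [he]
        have h1 : (xs.foldl (pvStepA mid k) (b + 1, 0)).1 = (b + 1) + pvSumB k (pvRunsB mid xs 0) :=
          ih (b + 1) 0 le_rfl hk
        have h2 : pvSumB k (pvRunsB mid xs (s + 1)) = pvSumB k (pvRunsB mid xs 0) + 1 := by
          have := pvSum_shift mid k hk xs 0 le_rfl
          simpa [he] using this
        simp only [pvRunsB, hx, if_true]
        omega
      · simp only [if_neg he]
        have h1 := ih b (s + 1) (by omega) (by omega)
        simp only [pvRunsB, hx, if_true]
        exact h1
    · simp only [hx, if_false]
      have h1 := ih b 0 le_rfl hk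
      by_cases h0 : s = 0
      · subst h0; simpa [pvRunsB, hx] using h1
      · simp only [pvRunsB, hx, if_false, ite_not, if_neg h0, pvSumB, List.map_cons,
          List.sum_cons]
        rw [pvFd_zero k s hs hsk]
        simpa [pvSumB] using h1

-- ===== VERDICT (by name: the statement is the Claim_ definition above) =====
theorem returnFlowerBloomDayAdj_spec : Claim_equal_returnFlowerBloomDayAdj := by
  intro mid bloomDay m k _
  unfold Spec_returnFlowerBloomDayAdj returnFlowerBloomDayAdj returnFlowerBloomDayAdj_alt
  by_cases hk : k ≤ 0
  · simp only [hk, if_true]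
    exact pvA_nonpos mid k hk bloomDay 0 0 le_rfl
  · have hk' : 0 < k := lt_of_not_ge hk
    simp only [if_neg hk]
    have := pvA_eq_sum mid k hk' bloomDay 0 0 le_rfl hk' 
    simpa [pvSumB] using this
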